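-- pv_equiv track=rewrite | github.com/Jeanzalez/Soluciones-de-Online-Judge---UVA | fry1.2.py | FryTabulacionOptimizada
-- ===== SOURCE A (Python) =====
-- def FryTabulacionOptimizada(T, E):
--     N,SE = len(T),sum(E)
--     tab_size = SE * 2 + 1
--     tab = [[0 for _ in range(tab_size)] for _ in range(2)]
--     n,e,curr,prev = N-1,0,0,1
--     while(n!=-1):
--         if(e==SE+1):
--             n,e,curr,prev = n-1,0,1-curr,1-prev
--         else:
--             if(e==0):
--                 tab[curr][e] = T[n]+tab[prev][e+E[n]]
--             else:
--                 tab[curr][e] = min(T[n]+tab[prev][e+E[n]],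
--                                 (T[n]>>1)+tab[prev][e+E[n]-1])
--             e += 1
--     return tab[prev][0]
-- ===== SOURCE B (Python) =====
-- def FryTabulacionOptimizada(T, E):
--     # Top-down memoized evaluation of only the states reachable from (0, 0),
--     # driven by an explicit DFS work stack (no full [0, 2*sum(E)] table).
--     N = len(T)
--     memo = {}
--     stack = [(0, 0)]
--     while stack:
--         i, e = stack.pop()
--         if i >= N or (i, e) in memo:
--             continue
--         t, en = T[i], E[i]
--         a = 0 if i + 1 >= N else memo.get((i + 1, e + en))
--         b = 0 if e == 0 else (0 if i + 1 >= N else memo.get((i + 1, e + en - 1)))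
--         if a is not None and b is not None:
--             memo[(i, e)] = t + a if e == 0 else min(t + a, (t >> 1) + b)
--         else:
--             stack.append((i, e))
--             if a is None:
--                 stack.append((i + 1, e + en))
--             if b is None:
--                 stack.append((i + 1, e + en - 1))
--     return memo[(0, 0)] if N else 0
-- ===== Notes on version B (the rewrite author's own statement) =====
-- stated objective: alternative
-- what changed: B replaces A's bottom-up two-row tabulation over every eating balance e in [0, 2*sum(E)] with a top-down memoized evaluation driven by an explicit DFS work stack, computing only the states reachable from (0,0) in a dict keyed (i, e).
-- outside the precondition, e.g. on FryTabulacionOptimizada([1], []): A raises IndexError, B raises IndexError; on FryTabulacionOptimizada([8, 3, 7], [1, -1, 3]): A returns 9, B returns 12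
import Mathlib
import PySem

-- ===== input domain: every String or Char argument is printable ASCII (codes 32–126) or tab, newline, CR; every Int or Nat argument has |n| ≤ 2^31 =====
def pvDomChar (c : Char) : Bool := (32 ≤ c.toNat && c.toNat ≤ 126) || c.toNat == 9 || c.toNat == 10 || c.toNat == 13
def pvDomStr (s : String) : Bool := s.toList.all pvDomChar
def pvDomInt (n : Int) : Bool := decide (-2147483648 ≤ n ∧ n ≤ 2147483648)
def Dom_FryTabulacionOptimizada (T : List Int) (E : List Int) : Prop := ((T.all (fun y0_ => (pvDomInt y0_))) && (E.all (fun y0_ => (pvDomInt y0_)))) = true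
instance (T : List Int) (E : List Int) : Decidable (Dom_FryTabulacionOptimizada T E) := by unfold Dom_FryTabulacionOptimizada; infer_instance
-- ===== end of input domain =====

-- B replaces A's bottom-up two-row table over every balance e in [0, 2*sum(E)] by a top-down
-- memoized evaluation (explicit DFS work stack + dict) of only the states reachable from (0,0).

-- ===== PORT A =====
def pvA_row (r : Int) (tab0 tab1 : List Int) : List Int := if r == 0 then tab0 else tab1
def pvA_loop (T E : List Int) (SE : Int) :
    Nat → Int → Int → Int → Int → List Int → List Int → Int
  | 0, _, _, _, _, _, _ => 0
  | fuel+1, n, e, curr, prev, tab0, tab1 =>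
    if n == -1 then PySem.List.pyGetD (pvA_row prev tab0 tab1) 0 0
    else if e == SE + 1 then
      pvA_loop T E SE fuel (n - 1) 0 (1 - curr) (1 - prev) tab0 tab1
    else
      let t := PySem.List.pyGetD T n 0
      let en := PySem.List.pyGetD E n 0
      let pr := pvA_row prev tab0 tab1
      let v := if e == 0 then t + PySem.List.pyGetD pr (e + en) 0
               else min (t + PySem.List.pyGetD pr (e + en) 0)
                        ((t >>> (1:Nat)) + PySem.List.pyGetD pr (e + en - 1) 0)
      let tab0' := if curr == 0 then PySem.List.pySetD tab0 e v else tab0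
      let tab1' := if curr == 0 then tab1 else PySem.List.pySetD tab1 e v
      pvA_loop T E SE fuel n (e + 1) curr prev tab0' tab1'
def FryTabulacionOptimizada (T : List Int) (E : List Int) : Int :=
  let SE := E.foldl (· + ·) 0
  let tab0 : List Int := List.replicate (SE * 2 + 1).toNat 0
  pvA_loop T E SE (T.length * (SE.toNat + 2) + 1) ((T.length : Int) - 1) 0 0 1 tab0 tab0

-- ===== PORT B =====
-- the while loop over (stack, memo); fuel only makes the recursion structural, 3^(len(T)+1)
-- is proved sufficient below (pvB_run)
def pvB_loop (T E : List Int) (N : Int) :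
    Nat → List (Int × Int) → PySem.Dict (Int × Int) Int → PySem.Dict (Int × Int) Int
  | 0, _, m => m
  | _ + 1, [], m => m
  | f + 1, (i, e) :: st, m =>
    if N ≤ i ∨ (m.get? (i, e)).isSome then pvB_loop T E N f st m
    else
      let t := PySem.List.pyGetD T i 0
      let en := PySem.List.pyGetD E i 0
      let a? : Option Int := if N ≤ i + 1 then some 0 else m.get? (i + 1, e + en)
      let b? : Option Int := if e = 0 then some 0
               else if N ≤ i + 1 then some 0 else m.get? (i + 1, e + en - 1)
      if a?.isSome && b?.isSome then
        pvB_loop T E N f st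
          (m.insert (i, e)
            (if e = 0 then t + a?.getD 0
             else min (t + a?.getD 0) ((t >>> (1:Nat)) + b?.getD 0)))
      else
        pvB_loop T E N f
          ((if b?.isNone then [(i + 1, e + en - 1)] else []) ++
           (if a?.isNone then [(i + 1, e + en)] else []) ++ (i, e) :: st) m
def FryTabulacionOptimizada_alt (T : List Int) (E : List Int) : Int :=
  let N : Int := T.length
  let m := pvB_loop T E N (3 ^ (T.length + 1)) [(0, 0)] PySem.Dict.empty
  -- Python: 'memo[(0,0)] if N else 0'; the key is proved present whenever N ≠ 0, so the
  -- KeyError branch is unreachable and getD's default is never used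
  if N = 0 then 0 else (m.get? (0, 0)).getD 0

-- ===== PRECONDITION & SPEC =====
-- Pre_ restricts to the problem's natural domain (at least as many energy values as frying times, all
-- energies nonnegative): with fewer energies than times A raises IndexError, and with a
-- negative energy entry A's tab[prev][e+E[n]] reads an accidental cell through negative-index wraparound.
def Pre_FryTabulacionOptimizada (T : List Int) (E : List Int) : Prop :=
  T.length ≤ E.length ∧ ∀ x ∈ E, 0 ≤ x
instance (T : List Int) (E : List Int) : Decidable (Pre_FryTabulacionOptimizada T E) := by
  unfold Pre_FryTabulacionOptimizada; infer_instance

def pvWitness_FryTabulacionOptimizada : List Int × List Int := ([3, 5], [1, 2])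

def Spec_FryTabulacionOptimizada (T : List Int) (E : List Int) (out : Int) : Prop := out = FryTabulacionOptimizada_alt T E
instance (T : List Int) (E : List Int) (out : Int) : Decidable (Spec_FryTabulacionOptimizada T E out) := by unfold Spec_FryTabulacionOptimizada; infer_instance

-- ===== CLAIM (what is proved, stated in full; the proofs are below) =====
def Claim_equal_FryTabulacionOptimizada : Prop := ∀ (T : List Int) (E : List Int), Dom_FryTabulacionOptimizada T E → Pre_FryTabulacionOptimizada T E → Spec_FryTabulacionOptimizada T E (FryTabulacionOptimizada T E)

-- ===== LEMMAS AND PROOFS =====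

-- the recurrence both programs compute: minimum time to fry the remaining items (head of the suffix
-- first) with current eating balance e; A tabulates it over e, B memoizes the reachable states
def gS : List Int → List Int → Int → Int
  | [], _, _ => 0
  | _ :: _, [], _ => 0
  | t :: Ts, en :: Es, e =>
    if e = 0 then t + gS Ts Es (e + en)
    else min (t + gS Ts Es (e + en)) ((t >>> (1:Nat)) + gS Ts Es (e + en - 1))
def rowF (SE : Int) : List Int → List Int → Int → Int
  | [], _, _ => 0
  | _ :: _, [], _ => 0
  | t :: Ts, en :: Es, j =>
    if 0 ≤ j ∧ j ≤ SE then
      (if j = 0 then t + rowF SE Ts Es (j + en)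
       else min (t + rowF SE Ts Es (j + en)) ((t >>> (1:Nat)) + rowF SE Ts Es (j + en - 1)))
    else 0
def canonRow (SE : Int) (Ts Es : List Int) : List Int :=
  (List.range (SE * 2 + 1).toNat).map (fun j : Nat => rowF SE Ts Es (j : Int))
def RowIs (SE : Int) (Ts Es : List Int) (P : List Int) : Prop :=
  P.length = (SE * 2 + 1).toNat ∧ ∀ (j : Nat) (hj : j < P.length), P[j] = rowF SE Ts Es (j : Int)
lemma rowF_high (SE : Int) (Ts Es : List Int) (j : Int) (h : ¬ (0 ≤ j ∧ j ≤ SE)) :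
    rowF SE Ts Es j = 0 := by
  match Ts, Es with
  | [], _ => rfl
  | _ :: _, [] => rfl
  | t :: Ts', en :: Es' => simp only [rowF, if_neg h]

lemma pvA_inner (T E : List Int) (SE : Int) (hSE : SE = E.sum)
    (hlen : T.length ≤ E.length) (hE : ∀ x ∈ E, 0 ≤ x)
    (k : Nat) (hk : k < T.length) :
    ∀ (m : Nat) (f : Nat) (curr prev : Int) (tab0 tab1 : List Int),
      m ≤ SE.toNat + 1 →
      ((curr = 0 ∧ prev = 1) ∨ (curr = 1 ∧ prev = 0)) →
      RowIs SE (T.drop (k+1)) (E.drop (k+1)) (pvA_row prev tab0 tab1) →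
      (pvA_row curr tab0 tab1).length = (SE * 2 + 1).toNat →
      (∀ (j : Nat) (hj : j < (pvA_row curr tab0 tab1).length), j < SE.toNat + 1 - m →
          (pvA_row curr tab0 tab1)[j] = rowF SE (T.drop k) (E.drop k) (j : Int)) →
      (∀ (j : Nat) (hj : j < (pvA_row curr tab0 tab1).length), SE.toNat < j →
          (pvA_row curr tab0 tab1)[j] = 0) →
      pvA_loop T E SE (m + f) (k : Int) (SE + 1 - m) curr prev tab0 tab1
        = pvA_loop T E SE f (k : Int) (SE + 1) curr prev
            (if curr = 0 then canonRow SE (T.drop k) (E.drop k) else tab0)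
            (if curr = 0 then tab1 else canonRow SE (T.drop k) (E.drop k)) := by
  have hSE0 : 0 ≤ SE := hSE ▸ List.sum_nonneg hE
  have hkE : k < E.length := lt_of_lt_of_le hk hlen
  have hen0 : 0 ≤ E[k] := hE _ (List.getElem_mem hkE)
  have henSE : E[k] ≤ SE := hSE ▸ List.single_le_sum hE _ (List.getElem_mem hkE)
  have hdropT : T.drop k = T[k] :: T.drop (k+1) := List.drop_eq_getElem_cons hk
  have hdropE : E.drop k = E[k] :: E.drop (k+1) := List.drop_eq_getElem_cons hkE
  intro m
  induction m with
  | zero =>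
    intro f curr prev tab0 tab1 _ hcp hprev hclen hcpart hchigh
    have htabs : ∀ (C : List Int), C.length = (SE * 2 + 1).toNat →
        (∀ (j : Nat) (hj : j < C.length), j < SE.toNat + 1 - 0 → C[j] = rowF SE (T.drop k) (E.drop k) (j : Int)) →
        (∀ (j : Nat) (hj : j < C.length), SE.toNat < j → C[j] = 0) →
        C = canonRow SE (T.drop k) (E.drop k) := by
      intro C hlenC hpart hhigh
      apply List.ext_getElem
      · simp [canonRow, hlenC]
      · intro j hj1 hj2
        simp only [canonRow, List.getElem_map, List.getElem_range]
        by_cases hjSE : j ≤ SE.toNat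
        · exact hpart j hj1 (by omega)
        · rw [hhigh j hj1 (by omega), rowF_high]
          rintro ⟨_, hle⟩
          omega
    rcases hcp with ⟨hc, hp⟩ | ⟨hc, hp⟩ <;> subst hc <;> subst hp <;>
      simp only [pvA_row, show ((0:Int) == 0) = true from rfl, show ((1:Int) == 0) = false from rfl,
        if_true, if_false, Bool.false_eq_true] at hprev hclen hcpart hchigh ⊢
    · rw [htabs tab0 hclen hcpart hchigh]
      simp only [Nat.zero_add, Int.natCast_zero, sub_zero]
    · rw [htabs tab1 hclen hcpart hchigh]
      simp only [Nat.zero_add, Int.natCast_zero, sub_zero, if_neg one_ne_zero]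
  | succ m ih =>
    intro f curr prev tab0 tab1 hm hcp hprev hclen hcpart hchigh
    have hm' : m ≤ SE.toNat := by omega
    set e : Int := SE + 1 - (m + 1 : Nat) with he_def
    have he : e = SE - m := by rw [he_def]; push_cast; ring
    have he0 : 0 ≤ e := by rw [he]; omega
    have heSE : e ≤ SE := by rw [he]; omega
    have heNat : e.toNat = SE.toNat - m := by omega
    have hprlen : (pvA_row prev tab0 tab1).length = (SE * 2 + 1).toNat := hprev.1
    have hread : ∀ (i : Int), 0 ≤ i → i ≤ SE * 2 →
        PySem.List.pyGetD (pvA_row prev tab0 tab1) i 0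
          = rowF SE (T.drop (k+1)) (E.drop (k+1)) i := by
      intro i hi0 hi2
      have hilt : i.toNat < (pvA_row prev tab0 tab1).length := by rw [hprlen]; omega
      rw [PySem.List.pyGetD_eq_getElem _ _ hi0 (by rw [hprlen]; omega),
        hprev.2 i.toNat hilt, Int.toNat_of_nonneg hi0]
    rw [show (m + 1) + f = (m + f) + 1 from by omega]
    simp only [pvA_loop]
    rw [if_neg (by simp only [beq_iff_eq]; omega),
        if_neg (by simp only [beq_iff_eq]; omega)]
    have hT : PySem.List.pyGetD T (k : Int) 0 = T[k] := by
      rw [PySem.List.pyGetD_eq_getElem _ _ (by omega) (by omega)]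
      simp
    have hEk : PySem.List.pyGetD E (k : Int) 0 = E[k] := by
      rw [PySem.List.pyGetD_eq_getElem _ _ (by omega) (by omega)]
      simp
    rw [hT, hEk]
    have hv : (if (e == 0) = true then T[k] + PySem.List.pyGetD (pvA_row prev tab0 tab1) (e + E[k]) 0
               else min (T[k] + PySem.List.pyGetD (pvA_row prev tab0 tab1) (e + E[k]) 0)
                        ((T[k] >>> (1:Nat)) + PySem.List.pyGetD (pvA_row prev tab0 tab1) (e + E[k] - 1) 0))
        = rowF SE (T.drop k) (E.drop k) e := by
      rw [hdropT, hdropE]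
      simp only [rowF, if_pos (⟨he0, heSE⟩ : 0 ≤ e ∧ e ≤ SE), beq_iff_eq]
      by_cases h0 : e = 0
      · rw [if_pos h0, if_pos h0, hread (e + E[k]) (by omega) (by omega)]
      · rw [if_neg h0, if_neg h0, hread (e + E[k]) (by omega) (by omega),
          hread (e + E[k] - 1) (by omega) (by omega)]
    rw [hv]
    have hsetRow : ∀ (C : List Int), PySem.List.pySetD C e (rowF SE (T.drop k) (E.drop k) e)
        = C.set e.toNat (rowF SE (T.drop k) (E.drop k) e) := by
      intro C
      rw [show e = ((e.toNat : Nat) : Int) from (Int.toNat_of_nonneg he0).symm]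
      exact PySem.List.pySetD_natCast C e.toNat _
    rw [show e + 1 = SE + 1 - (m : Nat) from by rw [he]; omega]
    rcases hcp with ⟨hc, hp⟩ | ⟨hc, hp⟩ <;> subst hc <;> subst hp
    · simp only [show ((0:Int) == 0) = true from rfl, if_true]
      rw [hsetRow tab0]
      have := ih f 0 1 (tab0.set e.toNat (rowF SE (T.drop k) (E.drop k) e)) tab1
        (by omega) (Or.inl ⟨rfl, rfl⟩)
      simp only [pvA_row, show ((0:Int) == 0) = true from rfl, show ((1:Int) == 0) = false from rfl,
        if_true, if_false, Bool.false_eq_true] at this hprev hclen hcpart hchigh ⊢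
      rw [this hprev (by simp [hclen]) ?part ?high]
      case part =>
        intro j hj hjlt
        simp only [List.length_set] at hj
        rw [List.getElem_set]
        by_cases hje : e.toNat = j
        · rw [if_pos hje, ← hje, Int.toNat_of_nonneg he0]
        · rw [if_neg hje]
          exact hcpart j hj (by omega)
      case high =>
        intro j hj hjgt
        simp only [List.length_set] at hj
        rw [List.getElem_set, if_neg (by omega)]
        exact hchigh j hj hjgt
    · simp only [show ((1:Int) == 0) = false from rfl, if_false, Bool.false_eq_true]
      rw [hsetRow tab1]
      have := ih f 1 0 tab0 (tab1.set e.toNat (rowF SE (T.drop k) (E.drop k) e))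
        (by omega) (Or.inr ⟨rfl, rfl⟩)
      simp only [pvA_row, show ((0:Int) == 0) = true from rfl, show ((1:Int) == 0) = false from rfl,
        if_true, if_false, Bool.false_eq_true] at this hprev hclen hcpart hchigh ⊢
      rw [this hprev (by simp [hclen]) ?part ?high]
      simp only [if_neg (show (1:Int) ≠ 0 from one_ne_zero)]
      case part =>
        intro j hj hjlt
        simp only [List.length_set] at hj
        rw [List.getElem_set]
        by_cases hje : e.toNat = j
        · rw [if_pos hje, ← hje, Int.toNat_of_nonneg he0]
        · rw [if_neg hje]
          exact hcpart j hj (by omega)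
      case high =>
        intro j hj hjgt
        simp only [List.length_set] at hj
        rw [List.getElem_set, if_neg (by omega)]
        exact hchigh j hj hjgt

lemma canonRow_rowIs (SE : Int) (Ts Es : List Int) : RowIs SE Ts Es (canonRow SE Ts Es) := by
  constructor
  · simp [canonRow]
  · intro j hj
    simp only [canonRow] at hj ⊢
    rw [List.getElem_map, List.getElem_range]

lemma pvA_loop_swap (T E : List Int) (SE : Int) (fuel : Nat) (n e curr prev : Int)
    (tab0 tab1 : List Int) (hn : n ≠ -1) (he : e = SE + 1) :
    pvA_loop T E SE (fuel + 1) n e curr prev tab0 tab1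
      = pvA_loop T E SE fuel (n - 1) 0 (1 - curr) (1 - prev) tab0 tab1 := by
  simp only [pvA_loop]
  rw [if_neg (by simp only [beq_iff_eq]; exact hn), if_pos (by simp only [beq_iff_eq]; exact he)]

lemma rowF_eq_gS (SE : Int) (Ts Es : List Int) (e : Int)
    (hlen : Ts.length ≤ Es.length) (hE : ∀ x ∈ Es, 0 ≤ x)
    (he : 0 ≤ e) (hsum : e + (Es.take Ts.length).sum ≤ SE) :
    rowF SE Ts Es e = gS Ts Es e := by
  induction Ts generalizing Es e with
  | nil => cases Es <;> rfl
  | cons t Ts' ih =>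
    cases Es with
    | nil => simp at hlen
    | cons en Es' =>
      have hen : 0 ≤ en := hE en (by simp)
      have hE' : ∀ x ∈ Es', 0 ≤ x := fun x hx => hE x (by simp [hx])
      have htake : 0 ≤ (Es'.take Ts'.length).sum :=
        List.sum_nonneg (fun x hx => hE' x (List.mem_of_mem_take hx))
      have hsum' : e + en + (Es'.take Ts'.length).sum ≤ SE := by
        simpa [List.take_succ_cons, add_assoc] using hsum
      have hclip : 0 ≤ e ∧ e ≤ SE := ⟨he, by omega⟩
      simp only [rowF, gS, if_pos hclip]
      by_cases h0 : e = 0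
      · rw [if_pos h0, if_pos h0, ih Es' (e + en) (by simpa using hlen) hE' (by omega) (by omega)]
      · rw [if_neg h0, if_neg h0,
          ih Es' (e + en) (by simpa using hlen) hE' (by omega) (by omega),
          ih Es' (e + en - 1) (by simpa using hlen) hE' (by omega) (by omega)]

lemma pvA_outer (T E : List Int) (SE : Int) (hSE : SE = E.sum)
    (hlen : T.length ≤ E.length) (hE : ∀ x ∈ E, 0 ≤ x) :
    ∀ (k : Nat), k ≤ T.length → ∀ (curr prev : Int) (tab0 tab1 : List Int),
      ((curr = 0 ∧ prev = 1) ∨ (curr = 1 ∧ prev = 0)) →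
      RowIs SE (T.drop k) (E.drop k) (pvA_row prev tab0 tab1) →
      (pvA_row curr tab0 tab1).length = (SE * 2 + 1).toNat →
      (∀ (j : Nat) (hj : j < (pvA_row curr tab0 tab1).length), SE.toNat < j →
          (pvA_row curr tab0 tab1)[j] = 0) →
      pvA_loop T E SE (k * (SE.toNat + 2) + 1) ((k : Int) - 1) 0 curr prev tab0 tab1
        = rowF SE T E 0 := by
  have hSE0 : 0 ≤ SE := hSE ▸ List.sum_nonneg hE
  intro k
  induction k with
  | zero =>
    intro _ curr prev tab0 tab1 hcp hprev hclen hchigh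
    simp only [pvA_loop]
    rw [if_pos (by simp only [beq_iff_eq]; omega)]
    have h0len : 0 < (pvA_row prev tab0 tab1).length := by rw [hprev.1]; omega
    rw [show (0:Int) = ((0:Nat) : Int) from rfl, PySem.List.pyGetD_natCast,
      List.getD_eq_getElem _ _ h0len, hprev.2 0 h0len]
    simp
  | succ k ihk =>
    intro hk1 curr prev tab0 tab1 hcp hprev hclen hchigh
    have hk : k < T.length := by omega
    conv_lhs =>
      rw [show (k+1) * (SE.toNat + 2) + 1 = (SE.toNat + 1) + ((k * (SE.toNat + 2) + 1) + 1) from by ring,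
        show ((k+1 : Nat) : Int) - 1 = (k : Int) from by push_cast; ring,
        show (0 : Int) = SE + 1 - ((SE.toNat + 1 : Nat) : Int) from by omega]
    rw [pvA_inner T E SE hSE hlen hE k hk (SE.toNat + 1) _ curr prev tab0 tab1 (by omega) hcp
        hprev hclen (by intro j hj hjlt; omega) hchigh,
      pvA_loop_swap T E SE _ _ _ _ _ _ _ (by omega) rfl]
    have hcanonHigh : ∀ (P : List Int) (Ts Es : List Int), RowIs SE Ts Es P →
        ∀ (j : Nat) (hj : j < P.length), SE.toNat < j → P[j] = 0 := by
      intro P Ts Es hP j hj hjgt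
      rw [hP.2 j hj, rowF_high]
      rintro ⟨_, hle⟩
      omega
    rcases hcp with ⟨hc, hp⟩ | ⟨hc, hp⟩ <;> subst hc <;> subst hp
    · rw [show (1:Int) - 0 = 1 from by norm_num, show (1:Int) - 1 = 0 from by norm_num]
      simp only [if_true] at hprev hclen hchigh ⊢
      simp only [pvA_row, show (((0:Int)) == 0) = true from rfl, show (((1:Int)) == 0) = false from rfl,
        if_true, if_false, Bool.false_eq_true] at hprev hclen hchigh
      exact ihk (by omega) 1 0 (canonRow SE (T.drop k) (E.drop k)) tab1 (Or.inr ⟨rfl, rfl⟩)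
        (by simpa [pvA_row] using canonRow_rowIs SE (T.drop k) (E.drop k))
        (by simpa [pvA_row] using hprev.1)
        (by
          intro j hj hjgt
          simp only [pvA_row, show (((1:Int)) == 0) = false from rfl, if_false,
            Bool.false_eq_true] at hj ⊢
          exact hcanonHigh tab1 _ _ hprev j hj hjgt)
    · rw [show (1:Int) - 1 = 0 from by norm_num, show (1:Int) - 0 = 1 from by norm_num]
      simp only [if_neg (show (1:Int) ≠ 0 from one_ne_zero)] at hprev hclen hchigh ⊢
      simp only [pvA_row, show (((0:Int)) == 0) = true from rfl, show (((1:Int)) == 0) = false from rfl,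
        if_true, if_false, Bool.false_eq_true] at hprev hclen hchigh
      exact ihk (by omega) 0 1 tab0 (canonRow SE (T.drop k) (E.drop k)) (Or.inl ⟨rfl, rfl⟩)
        (by simpa [pvA_row] using canonRow_rowIs SE (T.drop k) (E.drop k))
        (by simpa [pvA_row] using hprev.1)
        (by
          intro j hj hjgt
          simp only [pvA_row, show (((0:Int)) == 0) = true from rfl, if_true] at hj ⊢
          exact hcanonHigh tab0 _ _ hprev j hj hjgt)

lemma A_eq_gS (T E : List Int) (hlen : T.length ≤ E.length) (hE : ∀ x ∈ E, 0 ≤ x) :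
    FryTabulacionOptimizada T E = gS T E 0 := by
  have hSE0 : 0 ≤ E.sum := List.sum_nonneg hE
  have hdropT : T.drop T.length = [] := by simp
  unfold FryTabulacionOptimizada
  rw [show E.foldl (· + ·) 0 = E.sum from List.sum_eq_foldl.symm,
    pvA_outer T E E.sum rfl hlen hE T.length le_rfl 0 1
      (List.replicate (E.sum * 2 + 1).toNat 0) (List.replicate (E.sum * 2 + 1).toNat 0)
      (Or.inl ⟨rfl, rfl⟩) ?prev (by simp [pvA_row]) ?high,
    rowF_eq_gS E.sum T E 0 hlen hE le_rfl ?sum]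
  case prev =>
    constructor
    · simp [pvA_row]
    · intro j hj
      simp only [pvA_row, show (((1:Int)) == 0) = false from rfl, if_false, Bool.false_eq_true,
        hdropT, List.getElem_replicate]
      rfl
  case high =>
    intro j hj hjgt
    simp [pvA_row]
  case sum =>
    have : E = E.take T.length ++ E.drop T.length := (List.take_append_drop _ _).symm
    have hds : 0 ≤ (E.drop T.length).sum :=
      List.sum_nonneg (fun x hx => hE x (List.mem_of_mem_drop hx))
    calc 0 + (E.take T.length).sum ≤ (E.take T.length).sum + (E.drop T.length).sum := by omega
    _ = E.sum := by rw [← List.sum_append, ← this]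

-- ===== B-side: the memo machine computes gS =====

-- memo invariant: every stored value is the recurrence's value for its state
def pvInv (T E : List Int) (m : PySem.Dict (Int × Int) Int) : Prop :=
  ∀ (i e v : Int), m.get? (i, e) = some v → v = gS (T.drop i.toNat) (E.drop i.toNat) e

lemma pvInv_insert (T E : List Int) (m : PySem.Dict (Int × Int) Int) (hInv : pvInv T E m)
    (i e v : Int) (hv : v = gS (T.drop i.toNat) (E.drop i.toNat) e) :
    pvInv T E (m.insert (i, e) v) := by
  intro i' e' v' h
  rw [PySem.Dict.get?_insert] at h
  by_cases hk : ((i', e') : Int × Int) = (i, e)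
  · rw [if_pos hk] at h
    have hi : i' = i := congrArg Prod.fst hk
    have he : e' = e := congrArg Prod.snd hk
    injection h with h2
    rw [hi, he, ← h2]
    exact hv
  · rw [if_neg hk] at h
    exact hInv i' e' v' h

lemma pvB_loop_nil (T E : List Int) (N : Int) (f : Nat) (m : PySem.Dict (Int × Int) Int) :
    pvB_loop T E N f [] m = m := by
  cases f <;> rfl

-- the port's resolved value at a ready state is the recurrence's value
lemma pvB_val (T E : List Int) (hlen : T.length ≤ E.length) (j : Nat) (hj : j < T.length)
    (e : Int) (m : PySem.Dict (Int × Int) Int) (hInv : pvInv T E m)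
    (a b : Int)
    (ha : (if (T.length : Int) ≤ (j : Int) + 1 then (some 0 : Option Int)
           else m.get? ((j : Int) + 1, e + E[j]'(lt_of_lt_of_le hj hlen))) = some a)
    (hb : (if e = 0 then (some 0 : Option Int)
           else if (T.length : Int) ≤ (j : Int) + 1 then some 0
           else m.get? ((j : Int) + 1, e + E[j]'(lt_of_lt_of_le hj hlen) - 1)) = some b) :
    (if e = 0 then T[j] + a
     else min (T[j] + a) ((T[j] >>> (1:Nat)) + b)) = gS (T.drop j) (E.drop j) e := by
  have hjE : j < E.length := lt_of_lt_of_le hj hlen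
  have hdT : T.drop j = T[j] :: T.drop (j+1) := List.drop_eq_getElem_cons hj
  have hdE : E.drop j = E[j] :: E.drop (j+1) := List.drop_eq_getElem_cons hjE
  have hcast : (((j : Int) + 1).toNat) = j + 1 := by omega
  have hA : a = gS (T.drop (j+1)) (E.drop (j+1)) (e + E[j]) := by
    by_cases hN : (T.length : Int) ≤ (j : Int) + 1
    · rw [if_pos hN] at ha
      injection ha with ha0
      rw [List.drop_eq_nil_of_le (by omega : T.length ≤ j + 1)]
      simp [gS]
      omega
    · rw [if_neg hN] at ha
      have := hInv ((j : Int) + 1) (e + E[j]) a ha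
      rwa [hcast] at this
  rw [hdT, hdE]
  by_cases h0 : e = 0
  · simp only [gS, if_pos h0, hA]
  · have hB : b = gS (T.drop (j+1)) (E.drop (j+1)) (e + E[j] - 1) := by
      rw [if_neg h0] at hb
      by_cases hN : (T.length : Int) ≤ (j : Int) + 1
      · rw [if_pos hN] at hb
        injection hb with hb0
        rw [List.drop_eq_nil_of_le (by omega : T.length ≤ j + 1)]
        simp [gS]
        omega
      · rw [if_neg hN] at hb
        have := hInv ((j : Int) + 1) (e + E[j] - 1) b hb
        rwa [hcast] at this
    simp only [gS, if_neg h0, hA, hB]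

-- one run of the machine from a state (j, e) on top of the stack: within 3^(k+1) steps it
-- removes the state, extends the memo consistently, and memoizes (j, e) itself when j < len(T)
lemma pvB_run (T E : List Int) (hlen : T.length ≤ E.length) :
    ∀ (k : Nat) (j : Nat) (e : Int), T.length - j ≤ k →
    ∀ (m : PySem.Dict (Int × Int) Int) (st : List (Int × Int)), pvInv T E m →
    ∃ (g : Nat) (m' : PySem.Dict (Int × Int) Int),
      g ≤ 3 ^ (k + 1) ∧ pvInv T E m' ∧
      (∀ (p : Int × Int) (v : Int), m.get? p = some v → m'.get? p = some v) ∧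
      (j < T.length → (m'.get? ((j : Int), e)).isSome = true) ∧
      ∀ f, pvB_loop T E (T.length : Int) (f + g) (((j : Int), e) :: st) m
            = pvB_loop T E (T.length : Int) f st m' := by
  intro k
  induction k with
  | zero =>
    intro j e hk m st hInv
    have hjN : T.length ≤ j := by omega
    refine ⟨1, m, by norm_num, hInv, fun _ _ h => h, fun h => absurd h (by omega), fun f => ?_⟩
    simp only [pvB_loop]
    rw [if_pos (Or.inl (by exact_mod_cast hjN))]
  | succ k ih =>
    intro j e hk m st hInv
    by_cases hjN : T.length ≤ j
    · refine ⟨1, m, Nat.one_le_pow _ _ (by norm_num), hInv, fun _ _ h => h,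
        fun h => absurd h (by omega), fun f => ?_⟩
      simp only [pvB_loop]
      rw [if_pos (Or.inl (by exact_mod_cast hjN))]
    · have h3k : 1 ≤ 3 ^ k := Nat.one_le_pow _ _ (by norm_num)
      have hj : j < T.length := by omega
      have hjE : j < E.length := lt_of_lt_of_le hj hlen
      have hNi : ¬ ((T.length : Int) ≤ (j : Int)) := by exact_mod_cast hjN
      have hT : PySem.List.pyGetD T ((j : Int)) 0 = T[j] := by
        rw [PySem.List.pyGetD_eq_getElem _ _ (by omega) (by omega)]
        simp
      have hE : PySem.List.pyGetD E ((j : Int)) 0 = E[j] := by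
        rw [PySem.List.pyGetD_eq_getElem _ _ (by omega) (by omega)]
        simp
      by_cases hmem : (m.get? ((j : Int), e)).isSome = true
      · refine ⟨1, m, Nat.one_le_pow _ _ (by norm_num), hInv, fun _ _ h => h,
          fun _ => hmem, fun f => ?_⟩
        simp only [pvB_loop]
        rw [if_pos (Or.inr hmem)]
      · -- the state is unresolved; look at its two dependencies
        set a? : Option Int := if (T.length : Int) ≤ (j : Int) + 1 then some 0
                               else m.get? ((j : Int) + 1, e + E[j]) with ha?def
        set b? : Option Int := if e = 0 then some 0
                               else if (T.length : Int) ≤ (j : Int) + 1 then some 0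
                               else m.get? ((j : Int) + 1, e + E[j] - 1) with hb?def
        by_cases hready : a?.isSome = true ∧ b?.isSome = true
        · -- both dependencies known: resolve in one step
          obtain ⟨a, ha⟩ := Option.isSome_iff_exists.mp hready.1
          obtain ⟨b, hb⟩ := Option.isSome_iff_exists.mp hready.2
          have hval := pvB_val T E hlen j hj e m hInv a b (ha?def ▸ ha) (hb?def ▸ hb)
          refine ⟨1, m.insert ((j : Int), e)
              (if e = 0 then T[j] + a else min (T[j] + a) ((T[j] >>> (1:Nat)) + b)),
            Nat.one_le_pow _ _ (by norm_num),
            pvInv_insert T E m hInv _ _ _ (by rw [Int.toNat_natCast]; exact hval.symm ▸ rfl),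
            ?ext, ?mem, fun f => ?_⟩
          case ext =>
            intro p v h
            rw [PySem.Dict.get?_insert]
            by_cases hp : p = ((j : Int), e)
            · exfalso
              rw [hp] at h
              rw [h] at hmem
              exact hmem rfl
            · rw [if_neg hp]; exact h
          case mem =>
            intro _
            rw [PySem.Dict.get?_insert_self]
            rfl
          · simp only [pvB_loop]
            rw [if_neg (fun hor => hor.elim hNi hmem)]
            simp only [hT, hE, ← ha?def, ← hb?def]
            rw [ha, hb, if_pos (show ((some a).isSome && ((some b).isSome)) = true from rfl)]
            simp only [Option.getD_some]
        · -- some dependency missing: push it (them) above the state and recurse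
          have hcf : ¬ ((a?.isSome && b?.isSome) = true) := by
            rw [Bool.and_eq_true]
            exact hready
          have hjN1 : j + 1 < T.length := by
            by_contra hge
            have hN1 : (T.length : Int) ≤ (j : Int) + 1 := by
              exact_mod_cast (by omega : T.length ≤ j + 1)
            apply hready
            constructor
            · rw [ha?def, if_pos hN1]; rfl
            · rw [hb?def]
              by_cases h0 : e = 0
              · rw [if_pos h0]; rfl
              · rw [if_neg h0, if_pos hN1]; rfl
          have hN1' : ¬ ((T.length : Int) ≤ (j : Int) + 1) := by
            exact_mod_cast (by omega : ¬ (T.length ≤ j + 1))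
          have hk' : T.length - (j + 1) ≤ k := by omega
          have hcast1 : ((j + 1 : Nat) : Int) = (j : Int) + 1 := by push_cast; ring
          -- process the pushed segment: first the top (b-child if pushed), then the a-child
          have hseg : ∃ (g₁ : Nat) (m₁ : PySem.Dict (Int × Int) Int),
              g₁ ≤ 2 * 3 ^ (k + 1) ∧ pvInv T E m₁ ∧
              (∀ (p : Int × Int) (v : Int), m.get? p = some v → m₁.get? p = some v) ∧
              (b?.isNone = true → (m₁.get? ((j : Int) + 1, e + E[j] - 1)).isSome = true) ∧
              (a?.isNone = true → (m₁.get? ((j : Int) + 1, e + E[j])).isSome = true) ∧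
              ∀ f, pvB_loop T E (T.length : Int) (f + g₁)
                    ((if b?.isNone then [((j : Int) + 1, e + E[j] - 1)] else []) ++
                     (if a?.isNone then [((j : Int) + 1, e + E[j])] else []) ++
                     (((j : Int), e) :: st)) m
                  = pvB_loop T E (T.length : Int) f (((j : Int), e) :: st) m₁ := by
            by_cases hbN : b?.isNone = true
            · obtain ⟨gb, mb, hgb, hInvb, hExtb, hMemb, hEqb⟩ :=
                ih (j + 1) (e + E[j] - 1) hk' m
                  ((if a?.isNone then [((j : Int) + 1, e + E[j])] else []) ++
                    (((j : Int), e) :: st)) hInv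
              by_cases haN : a?.isNone = true
              · obtain ⟨ga, ma, hga, hInva, hExta, hMema, hEqa⟩ :=
                  ih (j + 1) (e + E[j]) hk' mb (((j : Int), e) :: st) hInvb
                refine ⟨gb + ga, ma, by omega, hInva, fun p v h => hExta p v (hExtb p v h),
                  fun _ => ?memb, fun _ => by rw [← hcast1]; exact hMema hjN1, fun f => ?_⟩
                case memb =>
                  obtain ⟨v, hv⟩ := Option.isSome_iff_exists.mp (hcast1 ▸ hMemb hjN1)
                  rw [Option.isSome_iff_exists]
                  exact ⟨v, hExta _ v hv⟩
                · rw [if_pos hbN, if_pos haN,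
                    show f + (gb + ga) = (f + ga) + gb from by omega]
                  have h1 := hEqb (f + ga)
                  rw [hcast1, if_pos haN] at h1
                  have h2 := hEqa f
                  rw [hcast1] at h2
                  simp only [List.cons_append, List.nil_append] at h1 ⊢
                  rw [h1, h2]
              · have hnotA : ¬ (a?.isNone = true) := haN
                refine ⟨gb, mb, by omega, hInvb,
                  hExtb, fun _ => by rw [← hcast1]; exact hMemb hjN1,
                  fun h => absurd h hnotA, fun f => ?_⟩
                rw [if_pos hbN, if_neg hnotA]
                have h1 := hEqb f
                rw [hcast1, if_neg hnotA] at h1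
                simp only [List.cons_append, List.nil_append] at h1 ⊢
                exact h1
            · have hnotB : ¬ (b?.isNone = true) := hbN
              have hbS : b?.isSome = true := Option.isSome_iff_ne_none.mpr
                (fun hn => hnotB (Option.isNone_iff_eq_none.mpr hn))
              have haN : a?.isNone = true := by
                by_contra haN'
                have haS : a?.isSome = true := Option.isSome_iff_ne_none.mpr
                  (fun hn => haN' (Option.isNone_iff_eq_none.mpr hn))
                exact hready ⟨haS, hbS⟩
              obtain ⟨ga, ma, hga, hInva, hExta, hMema, hEqa⟩ :=
                ih (j + 1) (e + E[j]) hk' m (((j : Int), e) :: st) hInv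
              refine ⟨ga, ma, by omega, hInva, hExta,
                fun h => absurd h hnotB, fun _ => by rw [← hcast1]; exact hMema hjN1,
                fun f => ?_⟩
              rw [if_neg hnotB, if_pos haN]
              have h1 := hEqa f
              rw [hcast1] at h1
              simp only [List.cons_append, List.nil_append] at h1 ⊢
              exact h1
          obtain ⟨g₁, m₁, hg₁, hInv₁, hExt₁, hMemb₁, hMema₁, hEq₁⟩ := hseg
          -- after the segment, pop (j, e) again: either it got memoized meanwhile, or both
          -- dependencies are now present and it resolves
          by_cases hmem₁ : (m₁.get? ((j : Int), e)).isSome = true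
          · refine ⟨1 + g₁ + 1, m₁, by omega, hInv₁, hExt₁, fun _ => hmem₁, fun f => ?_⟩
            rw [show f + (1 + g₁ + 1) = ((f + 1) + g₁) + 1 from by omega]
            conv_lhs => simp only [pvB_loop]
            rw [if_neg (fun hor => hor.elim hNi hmem)]
            simp only [hT, hE, ← ha?def, ← hb?def]
            rw [if_neg hcf, hEq₁ (f + 1)]
            simp only [pvB_loop]
            rw [if_pos (Or.inr hmem₁)]
          · have hmem₁' : ¬ ((m₁.get? ((j : Int), e)).isSome = true) := hmem₁
            have ha₁ : ∃ a, m₁.get? ((j : Int) + 1, e + E[j]) = some a := by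
              by_cases haN : a?.isNone = true
              · exact Option.isSome_iff_exists.mp (hMema₁ haN)
              · have haS : a?.isSome = true := Option.isSome_iff_ne_none.mpr
                  (fun hn => haN (Option.isNone_iff_eq_none.mpr hn))
                obtain ⟨a, ha⟩ := Option.isSome_iff_exists.mp haS
                rw [ha?def, if_neg hN1'] at ha
                exact ⟨a, hExt₁ _ a ha⟩
            have hb₁ : e ≠ 0 → ∃ b, m₁.get? ((j : Int) + 1, e + E[j] - 1) = some b := by
              intro h0
              by_cases hbN : b?.isNone = true
              · exact Option.isSome_iff_exists.mp (hMemb₁ hbN)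
              · have hbS : b?.isSome = true := Option.isSome_iff_ne_none.mpr
                  (fun hn => hbN (Option.isNone_iff_eq_none.mpr hn))
                obtain ⟨b, hb⟩ := Option.isSome_iff_exists.mp hbS
                rw [hb?def, if_neg h0, if_neg hN1'] at hb
                exact ⟨b, hExt₁ _ b hb⟩
            obtain ⟨a, ha⟩ := ha₁
            have haeq : (if (T.length : Int) ≤ (j : Int) + 1 then (some 0 : Option Int)
                else m₁.get? ((j : Int) + 1, e + E[j])) = some a := by
              rw [if_neg hN1']
              exact ha
            have hbex : ∃ b : Int, (if e = 0 then (some 0 : Option Int)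
                else if (T.length : Int) ≤ (j : Int) + 1 then some 0
                else m₁.get? ((j : Int) + 1, e + E[j] - 1)) = some b := by
              by_cases h0 : e = 0
              · exact ⟨0, by rw [if_pos h0]⟩
              · obtain ⟨b, hb⟩ := hb₁ h0
                exact ⟨b, by rw [if_neg h0, if_neg hN1', hb]⟩
            obtain ⟨b, hbeq⟩ := hbex
            have hval := pvB_val T E hlen j hj e m₁ hInv₁ a b haeq hbeq
            refine ⟨1 + g₁ + 1, m₁.insert ((j : Int), e)
                (if e = 0 then T[j] + a else min (T[j] + a) ((T[j] >>> (1:Nat)) + b)),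
              by omega,
              pvInv_insert T E m₁ hInv₁ _ _ _
                (by rw [Int.toNat_natCast]; exact hval.symm ▸ rfl),
              ?ext2, ?mem2, fun f => ?_⟩
            case ext2 =>
              intro p v h
              rw [PySem.Dict.get?_insert]
              by_cases hp : p = ((j : Int), e)
              · exfalso
                have hgot := hExt₁ p v h
                rw [hp] at hgot
                rw [hgot] at hmem₁'
                exact hmem₁' rfl
              · rw [if_neg hp]
                exact hExt₁ p v h
            case mem2 =>
              intro _
              rw [PySem.Dict.get?_insert_self]
              rfl
            · rw [show f + (1 + g₁ + 1) = ((f + 1) + g₁) + 1 from by omega]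
              conv_lhs => simp only [pvB_loop]
              rw [if_neg (fun hor => hor.elim hNi hmem)]
              simp only [hT, hE, ← ha?def, ← hb?def]
              rw [if_neg hcf, hEq₁ (f + 1)]
              simp only [pvB_loop]
              rw [if_neg (fun hor => hor.elim hNi hmem₁')]
              simp only [hT, hE]
              rw [haeq, hbeq,
                if_pos (show ((some a).isSome && ((some b).isSome)) = true from rfl)]
              simp only [Option.getD_some]

lemma pvInv_empty (T E : List Int) : pvInv T E PySem.Dict.empty := by
  intro i e v h
  rw [PySem.Dict.get?_empty] at h
  cases h

lemma B_eq_gS (T E : List Int) (hlen : T.length ≤ E.length) :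
    FryTabulacionOptimizada_alt T E = gS T E 0 := by
  unfold FryTabulacionOptimizada_alt
  cases T with
  | nil => simp [gS]
  | cons t Ts =>
    have hlen' : (t :: Ts).length ≤ E.length := hlen
    obtain ⟨g, m', hg, hInv', _, hMem, hEq⟩ :=
      pvB_run (t :: Ts) E hlen' ((t :: Ts).length) 0 0 (by omega) PySem.Dict.empty []
        (pvInv_empty (t :: Ts) E)
    have hfuel : 3 ^ ((t :: Ts).length + 1) = (3 ^ ((t :: Ts).length + 1) - g) + g := by omega
    simp only [Nat.cast_zero] at hMem hEq
    obtain ⟨v, hv⟩ := Option.isSome_iff_exists.mp (hMem (by simp))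
    have hveq := hInv' 0 0 v hv
    simp only [Int.toNat_zero, List.drop_zero] at hveq
    rw [if_neg (show ¬((((t :: Ts).length : Nat) : Int) = 0) by simp only [List.length_cons]; omega), hfuel, hEq (3 ^ ((t :: Ts).length + 1) - g),
      pvB_loop_nil, hv, Option.getD_some, hveq]

-- ===== VERDICT (by name: the statement is the Claim_ definition above) =====
theorem FryTabulacionOptimizada_spec : Claim_equal_FryTabulacionOptimizada := by
  intro T E _ hpre
  unfold Spec_FryTabulacionOptimizada
  rw [A_eq_gS T E hpre.1 hpre.2, B_eq_gS T E hpre.1]
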